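-- pv_equiv track=rewrite | github.com/qxrksyy/cure | cogs/lastfm/lastfm_api.py | _get_largest_image
-- ===== SOURCE A (Python) =====
-- def _get_largest_image(images):
--     """Get the largest image URL from a list of Last.fm images"""
--     if not images or not isinstance(images, list):
--         return None
--
--     for size in ["extralarge", "large", "medium", "small"]:
--         for image in images:
--             if image.get("size") == size and image.get("#text"):
--                 return image.get("#text")
--
--     # If no sizes matched, try to get any valid image
--     for image in images:
--         if image.get("#text"):
--             return image.get("#text")
--
--     return None
-- ===== SOURCE B (Python) =====
-- def _get_largest_image(images):
--     """Get the largest image URL from a list of Last.fm images"""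
--     if not images or not isinstance(images, list):
--         return None
--
--     index = {}
--     fallback = None
--     for image in images:
--         text = image.get("#text")
--         if not text:
--             continue
--         if fallback is None:
--             fallback = text
--         size = image.get("size")
--         if size is not None and size not in index:
--             index[size] = text
--
--     for size in ["extralarge", "large", "medium", "small"]:
--         if size in index:
--             return index[size]
--     return fallback
-- ===== Notes on version B (the rewrite author's own statement) =====
-- stated objective: idiomatic
-- what changed: Replaces A's repeated per-priority rescans of the image list (plus a separate fallback scan) with a single pass that builds a size->url dict of first truthy entries and captures the first truthy url as fallback, then picks by priority lookup.
import Mathlib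
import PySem

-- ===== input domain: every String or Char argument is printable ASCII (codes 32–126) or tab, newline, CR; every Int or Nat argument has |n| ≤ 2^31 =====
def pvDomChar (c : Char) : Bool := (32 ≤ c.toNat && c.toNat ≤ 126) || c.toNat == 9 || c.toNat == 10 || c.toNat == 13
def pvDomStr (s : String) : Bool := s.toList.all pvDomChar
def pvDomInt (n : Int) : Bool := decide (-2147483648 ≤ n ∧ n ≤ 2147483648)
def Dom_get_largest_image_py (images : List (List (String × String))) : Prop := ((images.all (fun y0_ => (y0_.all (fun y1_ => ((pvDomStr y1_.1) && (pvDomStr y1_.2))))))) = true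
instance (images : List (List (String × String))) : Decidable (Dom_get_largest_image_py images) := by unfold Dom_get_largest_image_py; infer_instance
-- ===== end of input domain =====

-- B builds a size→url index and a fallback in one pass over the images, then picks by priority lookup (idiomatic; A rescans the list once per priority size).


-- ===== PORT A =====
-- image.get(k): first-match lookup in the association list (Python dict semantics)
def pvGetKey (img : List (String × String)) (k : String) : Option String :=
  (img.find? (fun p => p.1 == k)).map (·.2)

-- inner loop: first image whose size equals `s` and whose '#text' is truthy
def pvAInner (s : String) : List (List (String × String)) → Option String
  | [] => none
  | img :: rest =>
    match pvGetKey img "#text" with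
    | some t => if pvGetKey img "size" = some s ∧ t ≠ "" then some t else pvAInner s rest
    | none => pvAInner s rest

-- outer loop over the priority sizes
def pvAScan (images : List (List (String × String))) : List String → Option String
  | [] => none
  | s :: rest =>
    match pvAInner s images with
    | some t => some t
    | none => pvAScan images rest

-- final fallback loop: first image with a truthy '#text'
def pvAFall : List (List (String × String)) → Option String
  | [] => none
  | img :: rest =>
    match pvGetKey img "#text" with
    | some t => if t ≠ "" then some t else pvAFall rest
    | none => pvAFall rest

def get_largest_image_py (images : List (List (String × String))) : Option String :=
  if images = [] then none
  else
    match pvAScan images ["extralarge", "large", "medium", "small"] with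
    | some t => some t
    | none => pvAFall images

-- ===== PORT B =====
-- one pass: build (index : size → first truthy url, fallback : first truthy url)
def pvBStep (st : PySem.Dict String String × Option String)
    (img : List (String × String)) : PySem.Dict String String × Option String :=
  match pvGetKey img "#text" with
  | none => st
  | some t =>
    if t = "" then st
    else
      let fb := match st.2 with | none => some t | some f => some f
      let d := match pvGetKey img "size" with
        | none => st.1
        | some sz => if st.1.contains sz then st.1 else st.1.insert sz t
      (d, fb)

-- pick the first priority size present in the index, else the fallback
def pvBPick (d : PySem.Dict String String) (fb : Option String) : List String → Option String
  | [] => fb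
  | s :: rest => if d.contains s then d.get? s else pvBPick d fb rest

def get_largest_image_py_alt (images : List (List (String × String))) : Option String :=
  if images = [] then none
  else
    let st := images.foldl pvBStep (PySem.Dict.empty, none)
    pvBPick st.1 st.2 ["extralarge", "large", "medium", "small"]

-- ===== PRECONDITION & SPEC =====
def Spec_get_largest_image_py (images : List (List (String × String))) (out : Option String) : Prop := out = get_largest_image_py_alt images
instance (images : List (List (String × String))) (out : Option String) : Decidable (Spec_get_largest_image_py images out) := by unfold Spec_get_largest_image_py; infer_instance

-- ===== CLAIM (what is proved, stated in full; the proofs are below) =====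
def Claim_equal_get_largest_image_py : Prop := ∀ (images : List (List (String × String))), Dom_get_largest_image_py images → Spec_get_largest_image_py images (get_largest_image_py images)

-- ===== LEMMAS AND PROOFS =====

-- the index after the one-pass fold: existing entries win; otherwise the first match from the list
theorem pvFold_fst (l : List (List (String × String))) (d : PySem.Dict String String)
    (fb : Option String) (s : String) :
    ((l.foldl pvBStep (d, fb)).1).get? s = (d.get? s).or (pvAInner s l) := by
  induction l generalizing d fb with
  | nil => simp [pvAInner]
  | cons img rest ih =>
    simp only [List.foldl_cons, pvAInner]
    cases htext : pvGetKey img "#text" with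
    | none => simp [pvBStep, htext, ih]
    | some t =>
      by_cases ht : t = ""
      · simp [pvBStep, htext, ht, ih]
      · simp only [pvBStep, htext, ht]
        cases hsz : pvGetKey img "size" with
        | none =>
          simp [hsz, ih]
        | some sz =>
          by_cases hss : sz = s
          · subst hss
            by_cases hc : d.contains sz
            · have hsome : (d.get? sz).isSome := by
                rw [← PySem.Dict.contains_eq_isSome_get?]; exact hc
              obtain ⟨v, hv⟩ := Option.isSome_iff_exists.mp hsome
              simp [hc, ih, hv, ht, Option.or]
            · have hnone : d.get? sz = none := by
                have := PySem.Dict.contains_eq_isSome_get? (d := d) (k := sz)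
                rw [Bool.eq_false_iff.mpr hc] at this
                cases h : d.get? sz
                · rfl
                · rw [h] at this; simp at this
              simp [hc, ih, PySem.Dict.get?_insert_self, hnone, ht, Option.or]
          · have hne : ¬ (pvGetKey img "size" = some s ∧ t ≠ "") := by
              simp [hsz]; intro h; exact absurd h hss
            by_cases hc : d.contains sz
            · simp [hc, ih, hss]
            · simp [hc, ih, hss, PySem.Dict.get?_insert_of_ne d t (Ne.symm hss)]

-- the fallback after the fold: an existing fallback wins; otherwise the first truthy '#text'
theorem pvFold_snd (l : List (List (String × String))) (d : PySem.Dict String String)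
    (fb : Option String) :
    (l.foldl pvBStep (d, fb)).2 = fb.or (pvAFall l) := by
  induction l generalizing d fb with
  | nil => simp [pvAFall]
  | cons img rest ih =>
    simp only [List.foldl_cons, pvAFall]
    cases htext : pvGetKey img "#text" with
    | none => simp [pvBStep, htext, ih]
    | some t =>
      by_cases ht : t = ""
      · simp [pvBStep, htext, ht, ih]
      · cases fb with
        | none => simp [pvBStep, htext, ht, ih, Option.or]
        | some f => simp [pvBStep, htext, ht, ih, Option.or]

-- the priority-pick loop equals A's scan-then-fallback, given the two fold characterisations
theorem pvPick_eq (images : List (List (String × String))) (d : PySem.Dict String String)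
    (fb : Option String) (hd : ∀ s, d.get? s = pvAInner s images) (hfb : fb = pvAFall images) :
    ∀ prios : List String, pvBPick d fb prios =
      (match pvAScan images prios with
       | some t => some t
       | none => pvAFall images) := by
  intro prios
  induction prios with
  | nil => simp [pvBPick, pvAScan, hfb]
  | cons s rest ih =>
    simp only [pvBPick, pvAScan]
    cases h : pvAInner s images with
    | none =>
      have hc : d.contains s = false := by
        rw [PySem.Dict.contains_eq_isSome_get?, hd s, h]; rfl
      simp [hc, ih]
    | some t =>
      have hc : d.contains s = true := by
        rw [PySem.Dict.contains_eq_isSome_get?, hd s, h]; rfl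
      simp [hc, hd s, h]

-- ===== VERDICT (by name: the statement is the Claim_ definition above) =====
theorem get_largest_image_py_spec : Claim_equal_get_largest_image_py := by
  intro images _
  unfold Spec_get_largest_image_py get_largest_image_py get_largest_image_py_alt
  by_cases h : images = []
  · simp [h]
  · simp only [if_neg h]
    rw [pvPick_eq images _ _ ?_ ?_]
    · intro s
      rw [pvFold_fst images PySem.Dict.empty none s, PySem.Dict.get?_empty, Option.or]
    · rw [pvFold_snd images PySem.Dict.empty none, Option.or]
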